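-- pv_equiv track=rewrite | github.com/Chinosu/mips_formatter | generator.py | add_vertical_whitespace
-- ===== SOURCE A (Python) =====
-- from typing import List, Tuple
--
-- def add_vertical_whitespace(
--         tokens: List[List[Tuple[str, str]]]
--     ) -> List[List[Tuple[str, str]]]:
--     new_tokens = []
--     for i, subtokens in enumerate(tokens):
--         if (i > 0 and
--             len(subtokens) > 1 and
--             (subtokens[1][0] == 'COMMENT' or subtokens[0][0] == 'COMMENT') and
--             len(tokens[i - 1]) > 1 and
--             tokens[i - 1][1][0] == 'INSTRUCTION'):
--             new_tokens.append([('WHITESPACE', '')])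
--         new_tokens.append(subtokens)
--         if len(subtokens) > 0 and is_code_label_definition(subtokens):
--             j = i
--             while (j > -1 and
--                    len(tokens[j]) > 0 and
--                    (tokens[j][0][0] == 'COMMENT' or
--                     tokens[j][0][0] == 'DIRECTIVE' or
--                     is_code_label_definition(tokens[j]))):
--                 j -= 1
--             new_tokens.insert(len(new_tokens) - (i - j), [('WHITESPACE', '')])
--     return new_tokens
--
-- def is_code_label_definition(tokens: List[List[Tuple[str, str]]]) -> bool:
--     return tokens[0][0] == 'LABEL_DEFINITION' and not any(token[0] in [
--         'DIRECTIVE', 'INSTRUCTION', 'REGISTER', 'FLOAT', 'INTEGER',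
--         'CHAR', 'STRING', 'LABEL', 'COMMA', 'LBRACKET', 'RBRACKET'
--     ] for token in tokens)
-- ===== SOURCE B (Python) =====
-- from typing import List, Tuple
--
-- _EXCLUDED = ('DIRECTIVE', 'INSTRUCTION', 'REGISTER', 'FLOAT', 'INTEGER',
--              'CHAR', 'STRING', 'LABEL', 'COMMA', 'LBRACKET', 'RBRACKET')
--
-- def _is_label_def(line: List[Tuple[str, str]]) -> bool:
--     return line[0][0] == 'LABEL_DEFINITION' and all(t[0] not in _EXCLUDED for t in line)
--
-- def add_vertical_whitespace(
--         tokens: List[List[Tuple[str, str]]]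
--     ) -> List[List[Tuple[str, str]]]:
--     # Pass 1: one forward sweep.  'base' collects the appended lines (with the
--     # comment-separator blanks), 'run' is a DP counter for the length of the
--     # current run of comment/directive/label-definition lines, and every blank
--     # line a label definition owes is recorded as its absolute final position.
--     base = []
--     inserts = []   # strictly increasing absolute positions of blank lines
--     total = 0      # current length of the output built so far (base + inserts)
--     run = 0
--     prev = None
--     for line in tokens:
--         if (prev is not None and len(line) > 1 and
--                 (line[1][0] == 'COMMENT' or line[0][0] == 'COMMENT') and
--                 len(prev) > 1 and prev[1][0] == 'INSTRUCTION'):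
--             base.append([('WHITESPACE', '')])
--             total += 1
--         base.append(line)
--         total += 1
--         if len(line) > 0 and (line[0][0] == 'COMMENT' or
--                               line[0][0] == 'DIRECTIVE' or
--                               _is_label_def(line)):
--             run += 1
--         else:
--             run = 0
--         if len(line) > 0 and _is_label_def(line):
--             inserts.append(total - run)
--             total += 1
--         prev = line
--     # Pass 2: splice the blank lines in at their (increasing) final positions.
--     out = []
--     b = 0
--     for t, p in enumerate(inserts):
--         nb = p - t            # number of base items that precede this blank
--         out.extend(base[b:nb])
--         out.append([('WHITESPACE', '')])
--         b = nb
--     out.extend(base[b:])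
--     return out
-- ===== Notes on version B (the rewrite author's own statement) =====
-- stated objective: alternative
-- what changed: A re-scans backwards from each label definition and inserts blank lines into the middle of the growing output list; B makes one forward pass that keeps a DP run-length counter and records each blank line's final absolute position, then splices all blank lines in with a single linear merge pass.
import Mathlib
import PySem

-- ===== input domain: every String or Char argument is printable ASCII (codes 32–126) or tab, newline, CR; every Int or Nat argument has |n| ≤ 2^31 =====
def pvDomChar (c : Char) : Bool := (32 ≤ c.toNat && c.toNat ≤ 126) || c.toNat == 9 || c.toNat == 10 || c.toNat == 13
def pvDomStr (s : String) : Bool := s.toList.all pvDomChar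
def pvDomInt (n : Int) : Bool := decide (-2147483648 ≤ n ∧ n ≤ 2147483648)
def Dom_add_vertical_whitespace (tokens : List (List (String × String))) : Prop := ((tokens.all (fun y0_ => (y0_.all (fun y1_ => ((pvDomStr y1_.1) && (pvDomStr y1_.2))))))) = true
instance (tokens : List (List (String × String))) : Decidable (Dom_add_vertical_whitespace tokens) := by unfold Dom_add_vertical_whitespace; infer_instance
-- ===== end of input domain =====

-- B replaces A's per-label backward rescan and positional list-inserts by one forward
-- sweep with a DP run counter that records each blank line's final absolute position,
-- followed by a single splice pass (alternative algorithm, same observable result).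

-- ===== PORT A =====

-- the excluded tag list of is_code_label_definition
def pvExcl : List String := ["DIRECTIVE", "INSTRUCTION", "REGISTER", "FLOAT", "INTEGER",
  "CHAR", "STRING", "LABEL", "COMMA", "LBRACKET", "RBRACKET"]

-- guarded accessors: line[0][0] and line[1][0] (A only evaluates them after length guards)
def pvTag0 (l : List (String × String)) : String := (l.headD ("", "")).1
def pvTag1 (l : List (String × String)) : String := ((l.drop 1).headD ("", "")).1

-- is_code_label_definition (A calls it only on non-empty lines)
def pvIsCodeLabelDef (line : List (String × String)) : Bool :=
  match line with
  | [] => false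
  | t :: _ => t.1 == "LABEL_DEFINITION" && !(line.any (fun tok => pvExcl.contains tok.1))

-- the while condition 'len(tokens[j]) > 0 and (… COMMENT … DIRECTIVE … is_code_label_definition …)'
def pvWhileGuard (l : List (String × String)) : Bool :=
  match l with
  | [] => false
  | t :: _ => t.1 == "COMMENT" || t.1 == "DIRECTIVE" || pvIsCodeLabelDef l

-- the inner 'while j > -1 and …: j -= 1' loop
def pvWhileJ (tokens : List (List (String × String))) (j : Int) : Int :=
  if _h : j > -1 then
    match PySem.List.pyGet? tokens j with
    | some l =>
      if pvWhileGuard l then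
        pvWhileJ tokens (j - 1)
      else j
    | none => j
  else j
termination_by (j + 1).toNat
decreasing_by simp_wf; omega

-- the main 'for i, subtokens in enumerate(tokens)' loop, accumulating new_tokens
def pvGoA (tokens : List (List (String × String))) (i : Nat)
    (rem : List (List (String × String))) (acc : List (List (String × String))) :
    List (List (String × String)) :=
  match rem with
  | [] => acc
  | sub :: rest =>
    let prevOk : Bool :=
      match PySem.List.pyGet? tokens ((i : Int) - 1) with
      | some p => p.length > 1 && pvTag1 p == "INSTRUCTION"
      | none => false
    let acc1 := if decide (i > 0) && decide (sub.length > 1) &&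
        (pvTag1 sub == "COMMENT" || pvTag0 sub == "COMMENT") && prevOk then
        acc ++ [[("WHITESPACE", "")]]
      else acc
    let acc2 := acc1 ++ [sub]
    let acc3 := if decide (sub.length > 0) && pvIsCodeLabelDef sub then
        let j := pvWhileJ tokens (i : Int)
        PySem.List.insert acc2 ((acc2.length : Int) - ((i : Int) - j)) [("WHITESPACE", "")]
      else acc2
    pvGoA tokens (i + 1) rest acc3

def add_vertical_whitespace (tokens : List (List (String × String))) :
    List (List (String × String)) :=
  pvGoA tokens 0 tokens []

-- ===== PORT B =====

-- _is_label_def of Source B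
def pvIsLabelDefB (line : List (String × String)) : Bool :=
  (match line with
   | [] => false
   | t :: _ => t.1 == "LABEL_DEFINITION") && line.all (fun x => !(pvExcl.contains x.1))

-- the run-counter condition of Source B's pass 1
def pvCondB (line : List (String × String)) : Bool :=
  decide (line.length > 0) &&
    (pvTag0 line == "COMMENT" || pvTag0 line == "DIRECTIVE" || pvIsLabelDefB line)

structure PvStB where
  base : List (List (String × String))
  ins : List Nat
  total : Nat
  run : Nat
  prev : Option (List (String × String))
deriving Repr

-- one iteration of Source B's pass-1 loop
def pvStepB (st : PvStB) (line : List (String × String)) : PvStB :=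
  let sep : Bool :=
    match st.prev with
    | none => false
    | some p => decide (line.length > 1) &&
        (pvTag1 line == "COMMENT" || pvTag0 line == "COMMENT") &&
        decide (p.length > 1) && pvTag1 p == "INSTRUCTION"
  let base1 := if sep then st.base ++ [[("WHITESPACE", "")]] else st.base
  let total1 := if sep then st.total + 1 else st.total
  let base2 := base1 ++ [line]
  let total2 := total1 + 1
  let run2 := if pvCondB line then st.run + 1 else 0
  if decide (line.length > 0) && pvIsLabelDefB line then
    { base := base2, ins := st.ins ++ [total2 - run2], total := total2 + 1,
      run := run2, prev := some line }
  else
    { base := base2, ins := st.ins, total := total2, run := run2, prev := some line }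

-- pass 2 of Source B: splice the blank lines in at their recorded absolute positions
def pvSplice (base : List (List (String × String))) (ins : List Nat) (t b : Nat)
    (out : List (List (String × String))) : List (List (String × String)) :=
  match ins with
  | [] => out ++ PySem.List.slice base (some (b : Int)) none
  | p :: rest =>
    let nb := p - t
    pvSplice base rest (t + 1) nb
      (out ++ PySem.List.slice base (some (b : Int)) (some (nb : Int)) ++ [[("WHITESPACE", "")]])

def add_vertical_whitespace_alt (tokens : List (List (String × String))) :
    List (List (String × String)) :=
  let st := tokens.foldl pvStepB ⟨[], [], 0, 0, none⟩
  pvSplice st.base st.ins 0 0 []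

-- ===== PRECONDITION & SPEC =====
def Spec_add_vertical_whitespace (tokens : List (List (String × String))) (out : List (List (String × String))) : Prop := out = add_vertical_whitespace_alt tokens
instance (tokens : List (List (String × String))) (out : List (List (String × String))) : Decidable (Spec_add_vertical_whitespace tokens out) := by unfold Spec_add_vertical_whitespace; infer_instance

-- ===== CLAIM (what is proved, stated in full; the proofs are below) =====
def Claim_equal_add_vertical_whitespace : Prop := ∀ (tokens : List (List (String × String))), Dom_add_vertical_whitespace tokens → Spec_add_vertical_whitespace tokens (add_vertical_whitespace tokens)

-- ===== LEMMAS AND PROOFS =====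

-- applying the recorded inserts (in order) to the appended base list
def pvFoldIns (base : List (List (String × String))) (ins : List Nat) :
    List (List (String × String)) :=
  ins.foldl (fun l p => l.take p ++ [("WHITESPACE", "")] :: l.drop p) base

-- the forward DP run counter = length of the maximal cond-suffix of the processed prefix
def pvRun (pre : List (List (String × String))) : Nat :=
  pre.foldl (fun r x => if pvCondB x then r + 1 else 0) 0

-- the two label-definition tests agree
theorem pvILD_eq (l : List (String × String)) : pvIsCodeLabelDef l = pvIsLabelDefB l := by
  cases l with
  | nil => rfl
  | cons t r =>
    simp only [pvIsCodeLabelDef, pvIsLabelDefB, List.any_cons, List.all_cons, Bool.not_or]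
    rw [List.all_eq_not_any_not]
    simp

-- the while guard is pvCondB
theorem pvGuard_eq (l : List (String × String)) : pvWhileGuard l = pvCondB l := by
  cases l with
  | nil => rfl
  | cons t r => simp [pvWhileGuard, pvCondB, pvTag0, pvILD_eq]

theorem pvRun_append (pre : List (List (String × String))) (x : List (String × String)) :
    pvRun (pre ++ [x]) = if pvCondB x then pvRun pre + 1 else 0 := by
  simp [pvRun, List.foldl_append]

theorem pvFoldIns_length (base : List (List (String × String))) (ins : List Nat) :
    (pvFoldIns base ins).length = base.length + ins.length := by
  induction ins generalizing base with
  | nil => simp [pvFoldIns]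
  | cons p rest ih =>
    have := ih (base.take p ++ [("WHITESPACE", "")] :: base.drop p)
    simp only [pvFoldIns, List.foldl_cons] at this ⊢
    rw [this]; simp; omega

theorem pvFoldIns_append_base (ins : List Nat) (base : List (List (String × String)))
    (x : List (String × String))
    (h : ∀ t (ht : t < ins.length), ins[t]'ht ≤ base.length + t) :
    pvFoldIns (base ++ [x]) ins = pvFoldIns base ins ++ [x] := by
  induction ins generalizing base with
  | nil => rfl
  | cons p rest ih =>
    have hp : p ≤ base.length := by have := h 0 (by simp); simpa using this
    have hstep : (base ++ [x]).take p ++ [("WHITESPACE", "")] :: (base ++ [x]).drop p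
        = (base.take p ++ [("WHITESPACE", "")] :: base.drop p) ++ [x] := by
      rw [List.take_append_of_le_length hp, List.drop_append_of_le_length hp]
      simp
    simp only [pvFoldIns, List.foldl_cons]
    rw [hstep]
    exact ih (base.take p ++ [("WHITESPACE", "")] :: base.drop p)
      (fun t ht => by
        have := h (t + 1) (by simpa using Nat.succ_lt_succ ht)
        simp at this ⊢
        omega)

theorem pvFoldIns_split (ins : List Nat) (pre suf : List (List (String × String)))
    (h : ∀ x ∈ ins, pre.length ≤ x) :
    pvFoldIns (pre ++ suf) ins = pre ++ pvFoldIns suf (ins.map (fun q => q - pre.length)) := by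
  induction ins generalizing suf with
  | nil => rfl
  | cons p rest ih =>
    have hp : pre.length ≤ p := h p (by simp)
    have hstep : (pre ++ suf).take p ++ [("WHITESPACE", "")] :: (pre ++ suf).drop p
        = pre ++ (suf.take (p - pre.length) ++ [("WHITESPACE", "")] :: suf.drop (p - pre.length)) := by
      rw [List.take_append, List.drop_append]
      rw [List.take_of_length_le hp, List.drop_of_length_le hp]
      simp
    simp only [pvFoldIns, List.foldl_cons, List.map_cons]
    rw [hstep]
    exact ih _ (fun x hx => h x (by simp [hx]))

theorem pvWhileJ_spec (tokens : List (List (String × String))) (k : Nat)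
    (hk : k < tokens.length) :
    pvWhileJ tokens (k : Int) = (k : Int) - (pvRun (tokens.take (k + 1)) : Int) := by
  induction k using Nat.strong_induction_on with
  | _ k ih =>
    have hget : PySem.List.pyGet? tokens ((k : Nat) : Int) = some (tokens[k]'hk) :=
      PySem.List.pyGet?_ofNat tokens k hk
    have htake : tokens.take (k + 1) = tokens.take k ++ [tokens[k]'hk] := by
      rw [List.take_succ]; simp [List.getElem?_eq_getElem hk]
    rw [pvWhileJ, dif_pos (by omega : (k : Int) > -1), hget]
    simp only [pvGuard_eq]
    by_cases hc : pvCondB (tokens[k]'hk)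
    · rw [if_pos hc]
      rw [htake, pvRun_append, if_pos hc]
      cases k with
      | zero =>
        rw [show ((0 : Nat) : Int) - 1 = -1 by omega, pvWhileJ, dif_neg (by omega)]
        simp [pvRun]
      | succ k' =>
        have hk' : k' < tokens.length := by omega
        have := ih k' (by omega) hk'
        rw [show ((k' + 1 : Nat) : Int) - 1 = ((k' : Nat) : Int) by omega, this]
        push_cast
        omega
    · rw [if_neg hc, htake, pvRun_append, if_neg hc]
      simp

-- strictly increasing Nat lists grow at least by one per index
theorem pvPwLower (p : Nat) (rest : List Nat) (hpw : List.Pairwise (· < ·) (p :: rest)) :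
    ∀ s (hs : s < rest.length), p + 1 + s ≤ rest[s]'hs := by
  induction rest generalizing p with
  | nil => intro s hs; simp at hs
  | cons q rest' ih =>
    intro s hs
    rcases List.pairwise_cons.1 hpw with ⟨hall, hpw'⟩
    have hpq : p < q := hall q (by simp)
    cases s with
    | zero => simpa using hpq
    | succ s' =>
      have := ih q hpw' s' (by simpa using hs)
      simp only [List.getElem_cons_succ]
      omega

theorem pvPwGeIdx (l : List Nat) (hpw : List.Pairwise (· < ·) l) :
    ∀ s (hs : s < l.length), s ≤ l[s]'hs := by
  cases l with
  | nil => intro s hs; simp at hs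
  | cons p rest =>
    intro s hs
    cases s with
    | zero => simp
    | succ s' =>
      have := pvPwLower p rest hpw s' (by simpa using hs)
      simp only [List.getElem_cons_succ]
      omega

-- the pass-1 invariant
def pvInv (pre : List (List (String × String))) (st : PvStB) : Prop :=
  st.total = st.base.length + st.ins.length ∧
  st.run = pvRun pre ∧
  st.run ≤ st.base.length ∧
  st.prev = pre.getLast? ∧
  (∀ t (ht : t < st.ins.length), st.ins[t]'ht < st.base.length + t) ∧
  (∀ p ∈ st.ins, p < st.total - st.run) ∧
  List.Pairwise (· < ·) st.ins

-- pass 1 preserves the invariant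
theorem pvStepB_inv (pre : List (List (String × String))) (sub : List (String × String))
    (st : PvStB) (hInv : pvInv pre st) : pvInv (pre ++ [sub]) (pvStepB st sub) := by
  obtain ⟨hTot, hRun, hRunLe, hPrev, hIdx, hLt, hPw⟩ := hInv
  simp only [pvStepB]
  cases hsep : (match st.prev with
    | none => false
    | some p => decide (sub.length > 1) &&
        (pvTag1 sub == "COMMENT" || pvTag0 sub == "COMMENT") &&
        decide (p.length > 1) && pvTag1 p == "INSTRUCTION") <;>
  cases hcond : pvCondB sub <;>
  cases hlab : (decide (sub.length > 0) && pvIsLabelDefB sub) <;>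
  (try simp only [Bool.false_eq_true, if_false, reduceIte]) <;>
  [skip; (exfalso
          rw [Bool.and_eq_true] at hlab
          simp [pvCondB, hlab.1, hlab.2] at hcond); skip; skip; skip;
        (exfalso
         rw [Bool.and_eq_true] at hlab
         simp [pvCondB, hlab.1, hlab.2] at hcond); skip; skip] <;>
  refine ⟨?_, ?_, ?_, ?_, ?_, ?_, ?_⟩ <;> (try dsimp only) <;>
  · first
    | (-- total
       show _ = _ + _
       simp only [List.length_append, List.length_cons, List.length_nil]
       omega)
    | (-- run
       show _ = pvRun (pre ++ [sub])
       rw [pvRun_append, hcond]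
       simp [hRun])
    | (-- run ≤ base length
       show _ ≤ _
       simp only [List.length_append, List.length_cons, List.length_nil]
       omega)
    | (-- prev
       show some sub = (pre ++ [sub]).getLast?
       simp)
    | (-- index bound, unchanged ins
       intro t ht
       have := hIdx t ht
       simp only [List.length_append, List.length_cons, List.length_nil] at this ⊢
       omega)
    | (-- index bound, extended ins
       intro t ht
       simp only [List.length_append, List.length_cons, List.length_nil] at ht
       rcases Nat.lt_or_ge t st.ins.length with hlt | hge
       · have := hIdx t hlt
         rw [List.getElem_append_left hlt]
         simp only [List.length_append, List.length_cons, List.length_nil] at this ⊢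
         omega
       · have ht' : t = st.ins.length := by omega
         subst ht'
         simp only [List.getElem_concat_length, List.length_append, List.length_cons,
           List.length_nil]
         omega)
    | (-- membership bound, unchanged ins
       intro p hp
       have := hLt p hp
       omega)
    | (-- membership bound, extended ins
       intro p hp
       rcases List.mem_append.1 hp with hmem | hmem
       · have := hLt p hmem
         omega
       · simp at hmem
         omega)
    | (-- pairwise, unchanged
       exact hPw)
    | (-- pairwise, extended
       rw [List.pairwise_append]
       refine ⟨hPw, List.pairwise_singleton _ _, ?_⟩
       intro a ha c hc
       simp at hc
       subst hc
       have := hLt a ha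
       omega)

-- one loop iteration of A tracked against one pass-1 step of B
theorem pvStep_main (pre : List (List (String × String))) (sub : List (String × String))
    (rest : List (List (String × String))) (st : PvStB) (hInv : pvInv pre st) :
    pvGoA (pre ++ sub :: rest) pre.length (sub :: rest) (pvFoldIns st.base st.ins) =
      pvGoA (pre ++ sub :: rest) (pre.length + 1) rest
        (pvFoldIns (pvStepB st sub).base (pvStepB st sub).ins) := by
  obtain ⟨hTot, hRun, hRunLe, hPrev, hIdx, hLt, hPw⟩ := hInv
  have hsepAB : (decide (pre.length > 0) && decide (sub.length > 1) &&
      (pvTag1 sub == "COMMENT" || pvTag0 sub == "COMMENT") &&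
      (match PySem.List.pyGet? (pre ++ sub :: rest) ((pre.length : Int) - 1) with
       | some p => p.length > 1 && pvTag1 p == "INSTRUCTION"
       | none => false))
      = (match st.prev with
         | none => false
         | some p => decide (sub.length > 1) &&
             (pvTag1 sub == "COMMENT" || pvTag0 sub == "COMMENT") &&
             decide (p.length > 1) && pvTag1 p == "INSTRUCTION") := by
    rcases List.eq_nil_or_concat pre with rfl | ⟨pre', q, rfl⟩
    · have h : st.prev = none := by simpa using hPrev
      simp [h]
    · simp only [List.concat_eq_append] at hRun hPrev ⊢
      have h : st.prev = some q := by simpa using hPrev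
      have hc : (((pre' ++ [q]).length : Int) - 1) = ((pre'.length : Nat) : Int) := by
        simp
      rw [h, hc, PySem.List.pyGet?_natCast]
      rw [List.getElem?_append_left (by simp)]
      simp [Bool.and_assoc]
  conv_lhs => rw [pvGoA]
  simp only [pvStepB]
  rw [hsepAB, pvILD_eq]
  cases hsep : (match st.prev with
    | none => false
    | some p => decide (sub.length > 1) &&
        (pvTag1 sub == "COMMENT" || pvTag0 sub == "COMMENT") &&
        decide (p.length > 1) && pvTag1 p == "INSTRUCTION") <;>
  cases hlab : (decide (sub.length > 0) && pvIsLabelDefB sub) <;>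
  (try simp only [Bool.false_eq_true, if_false, reduceIte])
  -- sep = false, no label definition
  · rw [pvFoldIns_append_base st.ins st.base sub
      (fun t ht => by have := hIdx t ht; omega)]
  -- sep = false, label definition
  · have hcondT : pvCondB sub = true := by
      rw [Bool.and_eq_true] at hlab
      simp [pvCondB, hlab.1, hlab.2]
    have htake : (pre ++ sub :: rest).take (pre.length + 1) = pre ++ [sub] := by
      rw [show pre ++ sub :: rest = (pre ++ [sub]) ++ rest by simp,
        show pre.length + 1 = (pre ++ [sub]).length by simp]
      exact List.take_left
    have hrunS : pvRun (pre ++ [sub]) = st.run + 1 := by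
      rw [pvRun_append, hcondT]
      simp [hRun]
    have hwj : pvWhileJ (pre ++ sub :: rest) ((pre.length : Nat) : Int) =
        ((pre.length : Nat) : Int) - ((st.run + 1 : Nat) : Int) := by
      rw [pvWhileJ_spec _ _ (by simp), htake, hrunS]
    rw [hcondT]
    simp only [reduceIte]
    rw [hwj]
    rw [← pvFoldIns_append_base st.ins st.base sub
      (fun t ht => by have := hIdx t ht; omega)]
    have hL := pvFoldIns_length (st.base ++ [sub]) st.ins
    have hpos : ((pvFoldIns (st.base ++ [sub]) st.ins).length : Int) -
        (((pre.length : Nat) : Int) - (((pre.length : Nat) : Int) - ((st.run + 1 : Nat) : Int))) =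
        (((pvFoldIns (st.base ++ [sub]) st.ins).length - (st.run + 1) : Nat) : Int) := by
      rw [hL]
      simp only [List.length_append, List.length_cons, List.length_nil]
      push_cast
      omega
    rw [hpos, PySem.List.insert_natCast _ _ _ (Nat.sub_le _ _)]
    rw [show pvFoldIns (st.base ++ [sub]) (st.ins ++ [st.total + 1 - (st.run + 1)]) =
        (pvFoldIns (st.base ++ [sub]) st.ins).take (st.total + 1 - (st.run + 1)) ++
          [("WHITESPACE", "")] :: (pvFoldIns (st.base ++ [sub]) st.ins).drop
            (st.total + 1 - (st.run + 1)) from by simp [pvFoldIns, List.foldl_append]]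
    have hPX : (pvFoldIns (st.base ++ [sub]) st.ins).length - (st.run + 1)
        = st.total + 1 - (st.run + 1) := by
      rw [hL]
      simp only [List.length_append, List.length_cons, List.length_nil]
      omega
    rw [hPX]
  -- sep = true, no label definition
  · rw [pvFoldIns_append_base st.ins (st.base ++ [[("WHITESPACE", "")]]) sub
      (fun t ht => by have := hIdx t ht; simp only [List.length_append, List.length_cons,
        List.length_nil]; omega),
      pvFoldIns_append_base st.ins st.base [("WHITESPACE", "")]
      (fun t ht => by have := hIdx t ht; omega)]
  -- sep = true, label definition
  · have hcondT : pvCondB sub = true := by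
      rw [Bool.and_eq_true] at hlab
      simp [pvCondB, hlab.1, hlab.2]
    have htake : (pre ++ sub :: rest).take (pre.length + 1) = pre ++ [sub] := by
      rw [show pre ++ sub :: rest = (pre ++ [sub]) ++ rest by simp,
        show pre.length + 1 = (pre ++ [sub]).length by simp]
      exact List.take_left
    have hrunS : pvRun (pre ++ [sub]) = st.run + 1 := by
      rw [pvRun_append, hcondT]
      simp [hRun]
    have hwj : pvWhileJ (pre ++ sub :: rest) ((pre.length : Nat) : Int) =
        ((pre.length : Nat) : Int) - ((st.run + 1 : Nat) : Int) := by
      rw [pvWhileJ_spec _ _ (by simp), htake, hrunS]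
    rw [hcondT]
    simp only [reduceIte]
    rw [hwj]
    rw [← pvFoldIns_append_base st.ins st.base [("WHITESPACE", "")]
      (fun t ht => by have := hIdx t ht; omega)]
    rw [← pvFoldIns_append_base st.ins (st.base ++ [[("WHITESPACE", "")]]) sub
      (fun t ht => by have := hIdx t ht; simp only [List.length_append, List.length_cons,
        List.length_nil]; omega)]
    have hL := pvFoldIns_length ((st.base ++ [[("WHITESPACE", "")]]) ++ [sub]) st.ins
    have hpos : ((pvFoldIns ((st.base ++ [[("WHITESPACE", "")]]) ++ [sub]) st.ins).length : Int) -
        (((pre.length : Nat) : Int) - (((pre.length : Nat) : Int) - ((st.run + 1 : Nat) : Int))) =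
        (((pvFoldIns ((st.base ++ [[("WHITESPACE", "")]]) ++ [sub]) st.ins).length - (st.run + 1) : Nat) : Int) := by
      rw [hL]
      simp only [List.length_append, List.length_cons, List.length_nil]
      push_cast
      omega
    rw [hpos, PySem.List.insert_natCast _ _ _ (Nat.sub_le _ _)]
    rw [show pvFoldIns ((st.base ++ [[("WHITESPACE", "")]]) ++ [sub])
          (st.ins ++ [st.total + 1 + 1 - (st.run + 1)]) =
        (pvFoldIns ((st.base ++ [[("WHITESPACE", "")]]) ++ [sub]) st.ins).take
            (st.total + 1 + 1 - (st.run + 1)) ++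
          [("WHITESPACE", "")] :: (pvFoldIns ((st.base ++ [[("WHITESPACE", "")]]) ++ [sub]) st.ins).drop
            (st.total + 1 + 1 - (st.run + 1)) from by simp [pvFoldIns, List.foldl_append]]
    have hPX : (pvFoldIns ((st.base ++ [[("WHITESPACE", "")]]) ++ [sub]) st.ins).length - (st.run + 1)
        = st.total + 1 + 1 - (st.run + 1) := by
      rw [hL]
      simp only [List.length_append, List.length_cons, List.length_nil]
      omega
    rw [hPX]

-- main loop correspondence: A's loop body computes pvFoldIns of B's pass-1 state
theorem pvGoA_spec (rem : List (List (String × String))) :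
    ∀ (pre : List (List (String × String))) (st : PvStB),
      pvInv pre st →
      pvGoA (pre ++ rem) pre.length rem (pvFoldIns st.base st.ins) =
        pvFoldIns (rem.foldl pvStepB st).base (rem.foldl pvStepB st).ins ∧
      pvInv (pre ++ rem) (rem.foldl pvStepB st) := by
  induction rem with
  | nil => intro pre st h; exact ⟨rfl, by simpa using h⟩
  | cons sub rest ih =>
    intro pre st h
    have hstep := pvStep_main pre sub rest st h
    have hrec := ih (pre ++ [sub]) (pvStepB st sub) (pvStepB_inv pre sub st h)
    rw [show (pre ++ [sub]) ++ rest = pre ++ sub :: rest by simp,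
      show (pre ++ [sub]).length = pre.length + 1 by simp] at hrec
    exact ⟨by rw [hstep]; exact hrec.1, hrec.2⟩

theorem pvSplice_spec (ins : List Nat) :
    ∀ (base out : List (List (String × String))) (t b : Nat),
      (∀ s (hs : s < ins.length), ins[s]'hs ≤ base.length + t + s) →
      (∀ s (hs : s < ins.length), b + t + s ≤ ins[s]'hs) →
      List.Pairwise (· < ·) ins →
      pvSplice base ins t b out = out ++ pvFoldIns (base.drop b) (ins.map (fun q => q - (b + t))) := by
  induction ins with
  | nil =>
    intro base out t b _ _ _
    rw [pvSplice, PySem.List.slice_from_natCast]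
    rfl
  | cons p rest ih =>
    intro base out t b hup hlo hpw
    rcases List.pairwise_cons.1 hpw with ⟨hall, hpw'⟩
    have hbt : b + t ≤ p := by simpa using hlo 0 (by simp)
    have hup0 : p ≤ base.length + t := by simpa using hup 0 (by simp)
    have hq : p - t - b = p - (b + t) := by omega
    rw [pvSplice, PySem.List.slice_natCast, hq]
    rw [ih base _ (t + 1) (p - t)
      (fun s hs => by
        have := hup (s + 1) (by simpa using Nat.succ_lt_succ hs)
        simp only [List.getElem_cons_succ] at this; omega)
      (fun s hs => by
        have := pvPwLower p rest hpw s hs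
        omega)
      hpw']
    -- rewrite the right-hand side: peel the first insert, then split off the fixed prefix
    have hqlen : p - (b + t) ≤ (base.drop b).length := by simp; omega
    have hdd : (base.drop b).drop (p - (b + t)) = base.drop (p - t) := by
      rw [List.drop_drop]; congr 1; omega
    have hsplit := pvFoldIns_split (rest.map (fun q => q - (b + t)))
      ((base.drop b).take (p - (b + t)) ++ [[("WHITESPACE", "")]]) (base.drop (p - t))
      (by
        intro x hx
        rcases List.mem_map.1 hx with ⟨y, hy, rfl⟩
        rcases List.mem_iff_getElem.1 hy with ⟨s, hs, rfl⟩
        have h1 := pvPwLower p rest hpw s hs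
        simp only [List.length_append, List.length_take, List.length_cons, List.length_nil]
        omega)
    have hmaps : (rest.map (fun q => q - (b + t))).map
        (fun q => q - (((base.drop b).take (p - (b + t)) ++ [[("WHITESPACE", "")]]).length))
        = rest.map (fun q => q - (p - t + (t + 1))) := by
      rw [List.map_map]
      refine List.map_congr_left (fun y hy => ?_)
      rcases List.mem_iff_getElem.1 hy with ⟨s, hslt, rfl⟩
      have := pvPwLower p rest hpw s hslt
      simp only [Function.comp, List.length_append, List.length_take, List.length_cons,
        List.length_nil, List.length_drop]
      omega
    simp only [pvFoldIns] at hsplit ⊢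
    rw [List.map_cons, List.foldl_cons, hdd]
    rw [show (base.drop b).take (p - (b + t)) ++ [("WHITESPACE", "")] :: base.drop (p - t)
        = ((base.drop b).take (p - (b + t)) ++ [[("WHITESPACE", "")]]) ++ base.drop (p - t) by simp]
    rw [hsplit, hmaps]
    simp [List.append_assoc]

-- ===== VERDICT (by name: the statement is the Claim_ definition above) =====
theorem add_vertical_whitespace_spec : Claim_equal_add_vertical_whitespace := by
  unfold Claim_equal_add_vertical_whitespace
  intro tokens _
  unfold Spec_add_vertical_whitespace
  have h0 : pvInv [] ⟨[], [], 0, 0, none⟩ := by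
    refine ⟨rfl, rfl, Nat.le_refl 0, rfl, ?_, ?_, List.Pairwise.nil⟩
    · intro t ht; simp at ht
    · intro p hp; simp at hp
  obtain ⟨hA, hInvF⟩ := pvGoA_spec tokens [] ⟨[], [], 0, 0, none⟩ h0
  obtain ⟨hTot, hRun, hRunLe, hPrev, hIdx, hLt, hPw⟩ := hInvF
  rw [add_vertical_whitespace, add_vertical_whitespace_alt]
  rw [show pvGoA tokens 0 tokens [] =
      pvGoA ([] ++ tokens) ([] : List (List (String × String))).length tokens
        (pvFoldIns ([] : List (List (String × String))) []) from by simp [pvFoldIns]]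
  rw [hA]
  rw [pvSplice_spec _ _ _ 0 0
    (fun s hs => by have := hIdx s hs; omega)
    (fun s hs => by have := pvPwGeIdx _ hPw s hs; omega)
    hPw]
  simp
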